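-- pv_equiv track=rewrite | github.com/Eleirbag89/pyndie | lang/utils.py | caseInsensitivize
-- ===== SOURCE A (Python) =====
-- def caseInsensitivize(s):
-- 	dquote_split = s.split("\"")
-- 	for i in range(0,len(dquote_split)):
-- 		if i % 2 == 0:
-- 			dquote_split[i] = dquote_split[i].lower()
-- 	case_insensitive = ""
-- 	for i in range(0,len(dquote_split)):
-- 		if i % 2 != 0:
-- 			case_insensitive =  case_insensitive +"\""+dquote_split[i]+"\""
-- 		else:
-- 			case_insensitive =  case_insensitive +dquote_split[i]
-- 	return case_insensitive
-- ===== SOURCE B (Python) =====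
-- def caseInsensitivize(s):
--     out = []
--     inside = False
--     for ch in s:
--         if ch == '"':
--             out.append(ch)
--             inside = not inside
--         else:
--             out.append(ch if inside else ch.lower())
--     return ''.join(out)
-- ===== Notes on version B (the rewrite author's own statement) =====
-- stated objective: simpler
-- what changed: Replaced the split-on-quote / index-parity / reassemble pipeline with a single left-to-right character scan that keeps an inside-quote flag.
-- intended difference: On inputs containing an odd number of double-quote characters (an unterminated quoted segment) A appends an extra closing double quote that is not present in the input, while B returns the scanned text with its length unchanged; not fabricating a quote character is the intended behaviour. — e.g. on caseInsensitivize("A\"B"): A returns "a\"B\"", B returns "a\"B"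
import Mathlib
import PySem

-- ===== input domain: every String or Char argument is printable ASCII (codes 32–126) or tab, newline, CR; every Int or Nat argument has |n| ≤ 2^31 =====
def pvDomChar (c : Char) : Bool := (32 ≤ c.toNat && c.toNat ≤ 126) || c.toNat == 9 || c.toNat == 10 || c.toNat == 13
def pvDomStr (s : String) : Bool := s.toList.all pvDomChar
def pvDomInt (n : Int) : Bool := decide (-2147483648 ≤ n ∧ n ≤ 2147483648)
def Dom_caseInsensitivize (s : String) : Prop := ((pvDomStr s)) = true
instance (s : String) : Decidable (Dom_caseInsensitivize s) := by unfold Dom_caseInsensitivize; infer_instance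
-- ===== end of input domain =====

-- B replaces A's split/reassemble pipeline with one character scan keeping an inside-quote flag
-- (objective: simpler); on an odd number of double quotes A appends an extra closing quote, B does not (see D_).

-- ===== PORT A =====
def caseInsensitivize (s : String) : String :=
  let dquote_split := PySem.Chars.splitOn s.toList ['"']
  -- first loop: for i in range(len): if i % 2 == 0, lowercase piece i
  let dquote_split2 := (PySem.List.enumerate dquote_split).map
    (fun ix => if PySem.Int.mod ix.1 2 == 0 then PySem.Chars.lower ix.2 else ix.2)
  -- second loop: rebuild, wrapping odd-index pieces in quotes
  let case_insensitive := (PySem.List.enumerate dquote_split2).foldl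
    (fun acc ix => if PySem.Int.mod ix.1 2 != 0 then acc ++ ['"'] ++ ix.2 ++ ['"'] else acc ++ ix.2)
    ([] : List Char)
  String.ofList case_insensitive

-- ===== PORT B =====
def caseInsensitivize_alt (s : String) : String :=
  let r := s.toList.foldl
    (fun (st : List Char × Bool) ch =>
      if ch = '"' then (st.1 ++ [ch], !st.2)
      else (st.1 ++ [if st.2 then ch else PySem.Chars.lowerChar ch], st.2))
    (([] : List Char), false)
  String.ofList r.1

-- ===== PRECONDITION & SPEC =====
-- On inputs containing an odd number of double-quote characters A appends an extra closing double quote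
-- that is not present in the input; B returns the scanned text with its length unchanged, which is intended.
def D_caseInsensitivize (s : String) : Prop := s.toList.count '"' % 2 = 1
instance (s : String) : Decidable (D_caseInsensitivize s) := by unfold D_caseInsensitivize; infer_instance
def Spec_caseInsensitivize (s : String) (out : String) : Prop := ¬ D_caseInsensitivize s → out = caseInsensitivize_alt s
instance (s : String) (out : String) : Decidable (Spec_caseInsensitivize s out) := by unfold Spec_caseInsensitivize; infer_instance
def pvDiffWitness_caseInsensitivize : String := "A\"B"
def pvDiffWitnessOut_caseInsensitivize : String × String := ("a\"B\"", "a\"B")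

-- ===== CLAIM (what is proved, stated in full; the proofs are below) =====
def Claim_unchanged_caseInsensitivize : Prop := ∀ (s : String), Dom_caseInsensitivize s → Spec_caseInsensitivize s (caseInsensitivize s)
def Claim_changed_caseInsensitivize : Prop := Dom_caseInsensitivize (pvDiffWitness_caseInsensitivize) ∧ D_caseInsensitivize (pvDiffWitness_caseInsensitivize) ∧ caseInsensitivize (pvDiffWitness_caseInsensitivize) = pvDiffWitnessOut_caseInsensitivize.1 ∧ caseInsensitivize_alt (pvDiffWitness_caseInsensitivize) = pvDiffWitnessOut_caseInsensitivize.2 ∧ pvDiffWitnessOut_caseInsensitivize.1 ≠ pvDiffWitnessOut_caseInsensitivize.2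
def Claim_exact_caseInsensitivize : Prop := ∀ (s : String), Dom_caseInsensitivize s → D_caseInsensitivize s → caseInsensitivize s ≠ caseInsensitivize_alt s

-- ===== LEMMAS AND PROOFS =====

-- the one-pass scan, in recursive form (B's foldl is shown equal to it below)
def pvScan : List Char → Bool → List Char
  | [], _ => []
  | c :: cs, q =>
    if c = '"' then c :: pvScan cs (!q)
    else (if q then c else PySem.Chars.lowerChar c) :: pvScan cs q

-- splitOn ['"'] in recursive form
def pvPieces : List Char → List (List Char)
  | [] => [[]]
  | c :: cs =>
    if c = '"' then [] :: pvPieces cs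
    else match pvPieces cs with
      | [] => [[c]]          -- unreachable: pvPieces never returns []
      | h :: t => (c :: h) :: t

-- combined per-piece processing of A's two loops, with alternating parity flag
def pvAQ : List (List Char) → Bool → List Char
  | [], _ => []
  | p :: ps, q => (if q then '"' :: p ++ ['"'] else PySem.Chars.lower p) ++ pvAQ ps (!q)

theorem pvMod_two (n : ℤ) : PySem.Int.mod n 2 = n % 2 := by
  unfold PySem.Int.mod
  simp [Int.fmod_eq_emod]

theorem pvPieces_ne_nil (cs : List Char) : pvPieces cs ≠ [] := by
  cases cs with
  | nil => simp [pvPieces]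
  | cons c cs =>
    simp only [pvPieces]
    split
    · simp
    · cases h : pvPieces cs <;> simp

theorem pvInter_singleton (x : List Char) : List.intercalate ['"'] [x] = x := by
  simp [List.intercalate]

theorem pvInter_cons_cons (x y : List Char) (t : List (List Char)) :
    List.intercalate ['"'] (x :: y :: t) = x ++ '"' :: List.intercalate ['"'] (y :: t) := by
  simp [List.intercalate, List.intersperse]

theorem pvPieces_quote_free (cs : List Char) : ∀ p ∈ pvPieces cs, '"' ∉ p := by
  induction cs with
  | nil => simp [pvPieces]
  | cons c cs ih =>
    simp only [pvPieces]
    by_cases hc : c = '"'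
    · simp only [if_pos hc]
      intro p hp
      rcases List.mem_cons.mp hp with h | h
      · simp [h]
      · exact ih p h
    · simp only [if_neg hc]
      cases h : pvPieces cs with
      | nil => exact absurd h (pvPieces_ne_nil cs)
      | cons a t =>
        intro p hp
        rcases List.mem_cons.mp hp with h1 | h1
        · subst h1
          intro hmem
          rcases List.mem_cons.mp hmem with h2 | h2
          · exact hc h2.symm
          · exact ih a (by rw [h]; exact List.mem_cons_self) h2
        · exact ih p (by rw [h]; exact List.mem_cons_of_mem _ h1)

theorem pvPieces_intercalate (cs : List Char) : List.intercalate ['"'] (pvPieces cs) = cs := by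
  induction cs with
  | nil => simp [pvPieces, List.intercalate]
  | cons c cs ih =>
    simp only [pvPieces]
    by_cases hc : c = '"'
    · simp only [if_pos hc]
      cases h : pvPieces cs with
      | nil => exact absurd h (pvPieces_ne_nil cs)
      | cons a t =>
        rw [h] at ih
        rw [show ([] : List Char) :: a :: t = [] :: (a :: t) from rfl, pvInter_cons_cons]
        rw [ih, hc]
        simp
    · simp only [if_neg hc]
      cases h : pvPieces cs with
      | nil => exact absurd h (pvPieces_ne_nil cs)
      | cons a t =>
        rw [h] at ih
        cases t with
        | nil =>
          rw [pvInter_singleton]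
          rw [pvInter_singleton] at ih
          rw [ih]
        | cons b t2 =>
          rw [pvInter_cons_cons] at ih ⊢
          rw [List.cons_append, ih]

theorem pvPieces_length (cs : List Char) : (pvPieces cs).length = cs.count '"' + 1 := by
  induction cs with
  | nil => simp [pvPieces]
  | cons c cs ih =>
    simp only [pvPieces]
    by_cases hc : c = '"'
    · simp [hc, ih]
    · rw [if_neg hc]
      cases h : pvPieces cs with
      | nil => exact absurd h (pvPieces_ne_nil cs)
      | cons a t =>
        rw [h] at ih
        simp only [List.length_cons] at ih ⊢
        simp [hc]
        omega

theorem pvScan_quote_free_append (p ys : List Char) (q : Bool) (hp : '"' ∉ p) :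
    pvScan (p ++ ys) q = (if q then p else PySem.Chars.lower p) ++ pvScan ys q := by
  induction p with
  | nil => simp [PySem.Chars.lower]
  | cons c t ih =>
    have hc : c ≠ '"' := fun h => hp (by simp [h])
    have ht : '"' ∉ t := fun h => hp (by simp [h])
    simp only [List.cons_append, pvScan, if_neg hc, ih ht]
    cases q <;> simp [PySem.Chars.lower]

theorem pvScan_length (cs : List Char) (q : Bool) : (pvScan cs q).length = cs.length := by
  induction cs generalizing q with
  | nil => simp [pvScan]
  | cons c t ih =>
    simp only [pvScan]
    split <;> simp [ih]

-- the central characterisation: A's per-piece processing of the pieces of cs is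
-- B's scan of cs plus the opening/closing quotes A fabricates
theorem pvAQ_pieces (ps : List (List Char)) (hne : ps ≠ []) (hqf : ∀ p ∈ ps, '"' ∉ p) (q : Bool) :
    pvAQ ps q = (if q then ['"'] else []) ++ pvScan (List.intercalate ['"'] ps) q
      ++ (if xor q (ps.length % 2 = 0) then ['"'] else []) := by
  induction ps generalizing q with
  | nil => exact absurd rfl hne
  | cons p ps ih =>
    cases ps with
    | nil =>
      have hp : '"' ∉ p := hqf p (by simp)
      have := pvScan_quote_free_append p [] q hp
      simp only [List.intercalate, pvAQ, List.intersperse]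
      rw [show List.flatten [p] = p ++ [] by simp, this]
      cases q <;> simp [pvScan]
    | cons p2 ps2 =>
      have hp : '"' ∉ p := hqf p (by simp)
      have hqf' : ∀ x ∈ p2 :: ps2, '"' ∉ x := fun x hx => hqf x (by simp [hx])
      have hic : List.intercalate ['"'] (p :: p2 :: ps2)
          = p ++ '"' :: List.intercalate ['"'] (p2 :: ps2) := by
        simp [List.intercalate, List.intersperse]
      rw [hic]
      have hscan : pvScan (p ++ '"' :: List.intercalate ['"'] (p2 :: ps2)) q
          = (if q then p else PySem.Chars.lower p) ++ '"' :: pvScan (List.intercalate ['"'] (p2 :: ps2)) (!q) := by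
        rw [pvScan_quote_free_append p _ q hp]
        simp [pvScan]
      rw [hscan]
      conv_lhs => rw [pvAQ]
      rw [ih (by simp) hqf' (!q)]
      have hxor : xor (!q) ((p2 :: ps2).length % 2 = 0)
          = xor q ((p :: p2 :: ps2).length % 2 = 0) := by
        simp only [List.length_cons]
        by_cases h : (ps2.length + 1) % 2 = 0
        · have h' : ¬ (ps2.length + 1 + 1) % 2 = 0 := by omega
          cases q <;> simp [h, h']
        · have h' : (ps2.length + 1 + 1) % 2 = 0 := by omega
          cases q <;> simp [h, h']
      rw [hxor]
      cases q <;> simp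

-- A's two loops in alternating-flag form
def pvAlt : List (List Char) → Bool → List (List Char)
  | [], _ => []
  | p :: ps, b => (if b then PySem.Chars.lower p else p) :: pvAlt ps (!b)

def pvJ : List (List Char) → Bool → List Char
  | [], _ => []
  | p :: ps, b => (if b then '"' :: p ++ ['"'] else p) ++ pvJ ps (!b)

theorem pvParity_succ (n : ℤ) : (((n + 1) % 2 == 0) : Bool) = !((n % 2 == 0) : Bool) := by
  rcases Int.emod_two_eq n with h | h
  · have h1 : (n + 1) % 2 = 1 := by omega
    simp [h, h1]
  · have h1 : (n + 1) % 2 = 0 := by omega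
    simp [h, h1]

theorem pvMap_enum (ps : List (List Char)) (n : ℤ) :
    (PySem.List.enumerate ps n).map
        (fun ix => if PySem.Int.mod ix.1 2 == 0 then PySem.Chars.lower ix.2 else ix.2)
      = pvAlt ps ((n % 2 == 0) : Bool) := by
  induction ps generalizing n with
  | nil => simp [PySem.List.enumerate, pvAlt]
  | cons p ps ih =>
    simp only [PySem.List.enumerate, List.map_cons, pvAlt]
    rw [ih (n + 1), pvParity_succ, pvMod_two]

theorem pvFold_enum (ps : List (List Char)) (n : ℤ) (acc : List Char) :
    (PySem.List.enumerate ps n).foldl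
        (fun acc ix => if PySem.Int.mod ix.1 2 != 0 then acc ++ ['"'] ++ ix.2 ++ ['"'] else acc ++ ix.2)
        acc
      = acc ++ pvJ ps (!((n % 2 == 0) : Bool)) := by
  induction ps generalizing n acc with
  | nil => simp [PySem.List.enumerate, pvJ]
  | cons p ps ih =>
    simp only [PySem.List.enumerate, List.foldl_cons, pvJ]
    rw [ih (n + 1), pvParity_succ, pvMod_two]
    rcases Int.emod_two_eq n with h | h <;> simp [h]

theorem pvJ_alt (ps : List (List Char)) (b : Bool) :
    pvJ (pvAlt ps b) (!b) = pvAQ ps (!b) := by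
  induction ps generalizing b with
  | nil => simp [pvAlt, pvJ, pvAQ]
  | cons p ps ih =>
    simp only [pvAlt, pvJ, pvAQ]
    have := ih (!b)
    rw [Bool.not_not] at this
    cases b <;> simp_all

-- splitOn with separator ['"'] is pvPieces
theorem pvGo_eq (fuel : ℕ) : ∀ (l cur : List Char) (acc : List (List Char)), l.length < fuel →
    PySem.Chars.splitOn.go ['"'] fuel l cur acc
      = acc.reverse ++ (match pvPieces l with
          | [] => [cur.reverse]
          | h :: t => (cur.reverse ++ h) :: t) := by
  induction fuel with
  | zero => intro l cur acc h; omega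
  | succ fuel ih =>
    intro l cur acc h
    cases l with
    | nil =>
      simp [PySem.Chars.splitOn.go, pvPieces]
    | cons c rest =>
      by_cases hc : c = '"'
      · subst hc
        have hpre : List.isPrefixOf ['"'] ('"' :: rest) = true := by simp [List.isPrefixOf]
        rw [PySem.Chars.splitOn.go]
        simp only [hpre]
        rw [show List.drop (['"'] : List Char).length ('"' :: rest) = rest by simp]
        rw [ih rest [] (cur.reverse :: acc) (by simp at h ⊢; omega)]
        simp only [pvPieces]
        cases hp : pvPieces rest with
        | nil => exact absurd hp (pvPieces_ne_nil rest)
        | cons a t => simp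
      · have hpre : List.isPrefixOf ['"'] (c :: rest) = false := by
          simp [List.isPrefixOf]
          exact fun hh => hc hh.symm
        rw [PySem.Chars.splitOn.go]
        simp only [hpre, Bool.false_eq_true, if_false]
        rw [ih rest (c :: cur) acc (by simp at h ⊢; omega)]
        simp only [pvPieces, if_neg hc]
        cases hp : pvPieces rest with
        | nil => exact absurd hp (pvPieces_ne_nil rest)
        | cons a t => simp

theorem pvSplitOn_eq_pieces (cs : List Char) : PySem.Chars.splitOn cs ['"'] = pvPieces cs := by
  unfold PySem.Chars.splitOn
  rw [pvGo_eq (cs.length + 1) cs [] [] (by omega)]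
  cases hp : pvPieces cs with
  | nil => exact absurd hp (pvPieces_ne_nil cs)
  | cons a t => simp

-- A in scan form
theorem pvA_char (s : String) :
    (caseInsensitivize s).toList
      = pvScan s.toList false ++ (if s.toList.count '"' % 2 = 1 then ['"'] else []) := by
  unfold caseInsensitivize
  simp only []
  rw [pvMap_enum _ 0, pvFold_enum _ 0 []]
  have h0 : (((0 : ℤ) % 2 == 0) : Bool) = true := by decide
  rw [h0]
  have hJ := pvJ_alt (PySem.Chars.splitOn s.toList ['"']) true
  simp only [Bool.not_true] at hJ ⊢
  rw [hJ, List.nil_append, pvSplitOn_eq_pieces]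
  rw [pvAQ_pieces (pvPieces s.toList) (pvPieces_ne_nil _) (pvPieces_quote_free _) false]
  rw [pvPieces_intercalate]
  have hlen := pvPieces_length s.toList
  have hpar : (xor false (decide ((pvPieces s.toList).length % 2 = 0))) = decide (s.toList.count '"' % 2 = 1) := by
    rw [hlen]
    by_cases h : s.toList.count '"' % 2 = 1
    · have hh : (s.toList.count '"' + 1) % 2 = 0 := by omega
      simp [h, hh]
    · have hh : ¬ (s.toList.count '"' + 1) % 2 = 0 := by omega
      simp [h, hh]
  simp only [String.toList_ofList]
  rw [hpar]
  by_cases h : s.toList.count '"' % 2 = 1 <;> simp [h]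

-- B's foldl equals the scan
theorem pvB_fold (cs : List Char) (acc : List Char) (q : Bool) :
    cs.foldl
      (fun (st : List Char × Bool) ch =>
        if ch = '"' then (st.1 ++ [ch], !st.2)
        else (st.1 ++ [if st.2 then ch else PySem.Chars.lowerChar ch], st.2))
      (acc, q)
      = (acc ++ pvScan cs q, xor q (decide (cs.count '"' % 2 = 1))) := by
  induction cs generalizing acc q with
  | nil => simp [pvScan]
  | cons c t ih =>
    simp only [List.foldl_cons]
    by_cases hc : c = '"'
    · rw [if_pos hc, ih]
      subst hc
      have hpar : (xor (!q) (decide (List.count '"' t % 2 = 1)))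
          = (xor q (decide (List.count '"' ('"' :: t) % 2 = 1))) := by
        have h1 : List.count '"' ('"' :: t) = List.count '"' t + 1 := by simp
        rcases Nat.mod_two_eq_zero_or_one (List.count '"' t) with h | h
        · have hh : (List.count '"' t + 1) % 2 = 1 := by omega
          cases q <;> simp [h1, h, hh]
        · have hh : ¬ (List.count '"' t + 1) % 2 = 1 := by omega
          cases q <;> simp [h1, h, hh]
      rw [show pvScan ('"' :: t) q = '"' :: pvScan t (!q) from by simp [pvScan]]
      rw [← hpar]
      simp
    · rw [if_neg hc, ih]
      have h1 : List.count '"' (c :: t) = List.count '"' t := by simp [hc]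
      rw [show pvScan (c :: t) q = (if q then c else PySem.Chars.lowerChar c) :: pvScan t q from by
        simp [pvScan, hc]]
      rw [h1]
      simp

theorem pvB_char (s : String) : (caseInsensitivize_alt s).toList = pvScan s.toList false := by
  unfold caseInsensitivize_alt
  simp only []
  rw [pvB_fold s.toList [] false]
  simp

-- ===== VERDICT (by name: the statement is the Claim_ definition above) =====
theorem caseInsensitivize_spec : Claim_unchanged_caseInsensitivize := by
  intro s _ hD
  unfold D_caseInsensitivize at hD
  have hA := pvA_char s
  have hB := pvB_char s
  have hd : ¬ (s.toList.count '"' % 2 = 1) := hD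
  rw [if_neg hd, List.append_nil] at hA
  apply String.toList_inj.mp
  rw [hA, hB]

theorem caseInsensitivize_changed : Claim_changed_caseInsensitivize := by
  unfold Claim_changed_caseInsensitivize; decide

theorem caseInsensitivize_tight : Claim_exact_caseInsensitivize := by
  intro s _ hD hEq
  unfold D_caseInsensitivize at hD
  have hA := pvA_char s
  have hB := pvB_char s
  have hd : s.toList.count '"' % 2 = 1 := hD
  rw [if_pos hd] at hA
  have : (caseInsensitivize s).toList = (caseInsensitivize_alt s).toList := by rw [hEq]
  rw [hA, hB] at this
  have hlen := congrArg List.length this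
  simp [pvScan_length] at hlen
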